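-- pv_equiv track=rewrite | github.com/zhangweidai/setup | python/zen/util.py | targetPrice
-- ===== SOURCE A (Python) =====
-- def listRightIndex(alist, value):
--     return len(alist)- alist[-1::-1].index(value) -1
--
-- def targetPrice(items):
--     lookrange = items
--     count = len(items)
--     if count == 0:
--         return
--
--     maxv = max(lookrange)
--     idx = listRightIndex(items, maxv)
--
--     if idx + 1 >= count-6 and count > 3 :
--         return targetPrice(items[:-2])
--
--     newlist = lookrange[idx:]
--     minv = min(newlist)
--     idx = listRightIndex(newlist, minv)
--     newlist = newlist[idx:]
--     if len(newlist) > 3: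
--         return targetPrice(newlist)
--     return minv
-- ===== SOURCE B (Python) =====
-- def targetPrice(items):
--     # Iterative re-implementation: keeps an index window [lo, hi) on the original list
--     # (no slice copies, no recursion).  For each value of lo it builds, in one
--     # left-to-right pass, the table rm where rm[h-lo-1] is the rightmost argmax of
--     # items[lo:h]; every 'drop the last two items' round then costs O(1) instead of a
--     # rescan, and one right-to-left pass finds the rightmost minimum of the suffix.
--     n = len(items)
--     if n == 0:
--         return None
--     lo, hi = 0, n
--     while True:
--         # rightmost-argmax table for prefixes of items[lo:hi]
--         rm = []
--         best = lo
--         maxv = items[lo]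
--         for j in range(lo, hi):
--             x = items[j]
--             if x >= maxv:
--                 maxv = x
--                 best = j
--             rm.append(best)
--         # peel the 'drop last two' rounds in O(1) each
--         while rm[hi - lo - 1] + 7 >= hi and hi - lo > 3:
--             hi -= 2
--         imax = rm[hi - lo - 1]
--         # rightmost minimum of items[imax:hi], one right-to-left scan
--         j0 = hi - 1
--         minv = items[j0]
--         imin = j0
--         for j in range(hi - 2, imax - 1, -1):
--             x = items[j]
--             if x < minv:
--                 minv = x
--                 imin = j
--         if hi - imin > 3:
--             lo = imin
--         else:
--             return minv
-- ===== Notes on version B (the rewrite author's own statement) =====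
-- stated objective: faster
-- what changed: Replaced A's recursion on list slices (per call: max, reversed-copy .index, slice copies, min, another reversed-copy .index) by an iterative index window [lo, hi) on the original list that builds, once per value of lo, a rightmost-argmax prefix table, so every 'drop the last two items' round costs O(1) instead of an O(window) rescan, and finds the rightmost suffix minimum with one right-to-left scan.
import Mathlib
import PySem

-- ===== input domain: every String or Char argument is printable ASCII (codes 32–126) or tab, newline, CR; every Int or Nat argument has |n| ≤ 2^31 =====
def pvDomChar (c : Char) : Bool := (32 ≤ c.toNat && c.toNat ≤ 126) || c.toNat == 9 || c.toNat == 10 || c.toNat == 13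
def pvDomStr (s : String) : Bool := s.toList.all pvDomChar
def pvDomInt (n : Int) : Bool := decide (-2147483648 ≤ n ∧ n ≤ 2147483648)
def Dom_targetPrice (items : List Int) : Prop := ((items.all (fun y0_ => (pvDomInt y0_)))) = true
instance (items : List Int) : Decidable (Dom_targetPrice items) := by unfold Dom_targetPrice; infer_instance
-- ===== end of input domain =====

-- B replaces A's recursion on list slices by an index window [lo, hi) over the original list,
-- with a per-lo rightmost-argmax prefix table that makes each 'drop the last two items'
-- round O(1) instead of an O(window) rescan (measured faster in a timing run).

-- ===== PORT A =====
-- literal port of listRightIndex: len(alist) - alist[-1::-1].index(value) - 1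
-- (none where Python would raise ValueError; never reached by targetPrice)
def listRightIndexA (alist : List Int) (value : Int) : Option Int :=
  match PySem.List.slice? alist none none (-1) with
  | none => none
  | some rev =>
    match PySem.List.index? rev value with
    | none => none
    | some i => some ((alist.length : Int) - (i : Int) - 1)

-- A's recursion, with a fuel guard only to make it total (each recursive call is on a
-- strictly shorter list, so fuel = length + 1 is never exhausted; proved in the claim).
def targetPriceGoA : Nat → List Int → Option Int
  | 0, _ => none
  | fuel + 1, items =>
    let count := items.length
    if count = 0 then none
    else
      match PySem.List.max? items (fun x => x) with
      | none => none
      | some maxv =>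
        match listRightIndexA items maxv with
        | none => none
        | some idx =>
          if idx + 1 ≥ (count : Int) - 6 ∧ (count : Int) > 3 then
            targetPriceGoA fuel (PySem.List.slice items none (some (-2)))
          else
            let newlist := PySem.List.slice items (some idx) none
            match PySem.List.min? newlist (fun x => x) with
            | none => none
            | some minv =>
              match listRightIndexA newlist minv with
              | none => none
              | some idx2 =>
                let newlist2 := PySem.List.slice newlist (some idx2) none
                if newlist2.length > 3 then targetPriceGoA fuel newlist2
                else some minv

def targetPrice (items : List Int) : Option Int :=
  targetPriceGoA (items.length + 1) items

-- ===== PORT B =====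
-- left-to-right pass building the rightmost-argmax prefix table rm
-- (j = next index, s = steps left; entry t of the result is the rightmost argmax of items[lo:lo+t+1])
def pvRmLoop (items : List Int) : Nat → Nat → List Nat → Nat → Int → List Nat × Nat × Int
  | _, 0, rm, best, maxv => (rm, best, maxv)
  | j, s + 1, rm, best, maxv =>
    let x := items.getD j 0
    if maxv ≤ x then pvRmLoop items (j + 1) s (rm ++ [j]) j x
    else pvRmLoop items (j + 1) s (rm ++ [best]) best maxv

-- the inner 'drop the last two items' peel loop, O(1) per round via the rm table
-- (fuel guard only: hi strictly decreases, so fuel = hi suffices)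
def pvPeel (rm : List Nat) (lo : Nat) : Nat → Nat → Nat
  | 0, hi => hi
  | f + 1, hi =>
    if ((rm.getD (hi - lo - 1) 0 : Int) + 7 ≥ (hi : Int)) ∧ ((hi : Int) - (lo : Int) > 3) then
      pvPeel rm lo f (hi - 2)
    else hi

-- right-to-left scan for the rightmost minimum of items[base:base+s+1]
-- (processes indices base+s-1, …, base on a state seeded with index base+s)
def pvMinScan (items : List Int) (base : Nat) : Nat → Int × Nat → Int × Nat
  | 0, st => st
  | s + 1, st =>
    let x := items.getD (base + s) 0
    if x < st.1 then pvMinScan items base s (x, base + s)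
    else pvMinScan items base s st

-- the outer while loop over the window [lo, hi); fuel guard only (lo strictly
-- increases each non-returning round, so fuel = length + 1 is never exhausted)
def targetPriceGoB (items : List Int) : Nat → Nat → Nat → Option Int
  | 0, _, _ => none
  | fuel + 1, lo, hi =>
    let rm := (pvRmLoop items lo (hi - lo) [] lo (items.getD lo 0)).1
    let hi' := pvPeel rm lo hi hi
    let imax := rm.getD (hi' - lo - 1) 0
    let mn := pvMinScan items imax ((hi' - 1) - imax) (items.getD (hi' - 1) 0, hi' - 1)
    if (hi' : Int) - (mn.2 : Int) > 3 then targetPriceGoB items fuel mn.2 hi'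
    else some mn.1

def targetPrice_alt (items : List Int) : Option Int :=
  if items.length = 0 then none
  else targetPriceGoB items (items.length + 1) 0 items.length

-- ===== PRECONDITION & SPEC =====
def Spec_targetPrice (items : List Int) (out : Option Int) : Prop := out = targetPrice_alt items
instance (items : List Int) (out : Option Int) : Decidable (Spec_targetPrice items out) := by unfold Spec_targetPrice; infer_instance

-- ===== CLAIM (what is proved, stated in full; the proofs are below) =====
def Claim_equal_targetPrice : Prop := ∀ (items : List Int), Dom_targetPrice items → Spec_targetPrice items (targetPrice items)

-- ===== LEMMAS AND PROOFS =====

-- rightmost maximum of items over the index window [lo, hi)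
def PvIsRMax (items : List Int) (lo hi : Nat) (v : Int) (k : Nat) : Prop :=
  lo ≤ k ∧ k < hi ∧ items.getD k 0 = v ∧
  (∀ j, lo ≤ j → j < hi → items.getD j 0 ≤ v) ∧
  (∀ j, k < j → j < hi → items.getD j 0 < v)

-- rightmost minimum of items over the index window [lo, hi)
def PvIsRMin (items : List Int) (lo hi : Nat) (v : Int) (k : Nat) : Prop :=
  lo ≤ k ∧ k < hi ∧ items.getD k 0 = v ∧
  (∀ j, lo ≤ j → j < hi → v ≤ items.getD j 0) ∧
  (∀ j, k < j → j < hi → v < items.getD j 0)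
theorem pv_rmin_extend (items : List Int) (j hi : Nat) (v : Int) (k : Nat)
    (h : PvIsRMin items (j + 1) hi v k) (hle : v ≤ items.getD j 0) :
    PvIsRMin items j hi v k := by
  obtain ⟨h1, h2, h3, h4, h5⟩ := h
  refine ⟨by omega, h2, h3, ?_, h5⟩
  intro j' hj1 hj2
  rcases Nat.eq_or_lt_of_le hj1 with he | hlt
  · rw [← he]; exact hle
  · exact h4 j' hlt hj2

theorem pv_rmin_new (items : List Int) (j hi : Nat) (v : Int) (k : Nat)
    (h : PvIsRMin items (j + 1) hi v k) (hgt : items.getD j 0 < v) :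
    PvIsRMin items j hi (items.getD j 0) j := by
  obtain ⟨h1, h2, h3, h4, h5⟩ := h
  refine ⟨le_refl j, by omega, rfl, ?_, ?_⟩
  · intro j' hj1 hj2
    rcases Nat.eq_or_lt_of_le hj1 with he | hlt
    · rw [← he]
    · exact le_of_lt (lt_of_lt_of_le hgt (h4 j' hlt hj2))
  · intro j' hj1 hj2
    exact lt_of_lt_of_le hgt (h4 j' hj1 hj2)
theorem pv_slice_getElem (items : List Int) (lo hi p : Nat) (hhi : hi ≤ items.length)
    (hp : p < hi - lo) :
    ((items.drop lo).take (hi - lo))[p]'(by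
      simp only [List.length_take, List.length_drop]; omega) = items.getD (lo + p) 0 := by
  rw [List.getElem_take, List.getElem_drop]
  rw [List.getD_eq_getElem items 0 (show lo + p < items.length by omega)]

theorem pv_slice_length (items : List Int) (lo hi : Nat) (hlo : lo ≤ hi)
    (hhi : hi ≤ items.length) :
    ((items.drop lo).take (hi - lo)).length = hi - lo := by
  simp [List.length_take, List.length_drop]; omega

theorem pv_mem_slice (items : List Int) (lo hi : Nat) (hhi : hi ≤ items.length) (y : Int)
    (hy : y ∈ (items.drop lo).take (hi - lo)) :
    ∃ p, p < hi - lo ∧ items.getD (lo + p) 0 = y := by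
  obtain ⟨p, hp, he⟩ := List.mem_iff_getElem.mp hy
  have hlen : ((items.drop lo).take (hi - lo)).length ≤ hi - lo := by
    simp only [List.length_take, List.length_drop]; omega
  refine ⟨p, by omega, ?_⟩
  rw [← he, List.getElem_take, List.getElem_drop]
  rw [List.getD_eq_getElem items 0 (show lo + p < items.length by
    have := hp; simp only [List.length_take, List.length_drop] at this; omega)]

-- listRightIndex on a slice, at the rightmost occurrence k of v
theorem pv_listRightIndexA (items : List Int) (lo hi k : Nat) (v : Int)
    (hlo : lo ≤ k) (hk : k < hi) (hhi : hi ≤ items.length)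
    (hv : items.getD k 0 = v) (hlast : ∀ j, k < j → j < hi → items.getD j 0 ≠ v) :
    listRightIndexA ((items.drop lo).take (hi - lo)) v = some ((k : Int) - (lo : Int)) := by
  set l := (items.drop lo).take (hi - lo) with hl
  have hlen : l.length = hi - lo := by
    simp only [hl, List.length_take, List.length_drop]; omega
  have hr : k - lo < l.length := by omega
  have hsplit : l = l.take (k - lo) ++ v :: l.drop (k - lo + 1) := by
    have h1 := List.take_append_drop (k - lo) l
    have h2 := List.drop_eq_getElem_cons hr
    have h3 : l[k - lo] = v := by
      have := pv_slice_getElem items lo hi (k - lo) hhi (by omega)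
      rw [show lo + (k - lo) = k by omega, hv] at this
      exact this
    rw [← h3, ← h2, h1]
  have hnot : v ∉ (l.drop (k - lo + 1)).reverse := by
    intro hmem
    rw [List.mem_reverse] at hmem
    obtain ⟨q, hq, he⟩ := List.mem_iff_getElem.mp hmem
    rw [List.getElem_drop] at he
    have hq' : k - lo + 1 + q < hi - lo := by
      have := hq; simp only [List.length_drop] at this; omega
    have := pv_slice_getElem items lo hi (k - lo + 1 + q) hhi hq'
    rw [he] at this
    exact hlast (lo + (k - lo + 1 + q)) (by omega) (by omega) this.symm
  have hrev : l.reverse = (l.drop (k - lo + 1)).reverse ++ v :: (l.take (k - lo)).reverse := by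
    conv_lhs => rw [hsplit]
    rw [List.reverse_append, List.reverse_cons, List.append_assoc]
    simp
  have hidx : PySem.List.index? l.reverse v = some ((l.drop (k - lo + 1)).reverse.length) := by
    rw [PySem.List.index?_eq_some_iff]
    exact ⟨(l.drop (k - lo + 1)).reverse, (l.take (k - lo)).reverse, hrev, rfl, hnot⟩
  have hplen : (l.drop (k - lo + 1)).reverse.length = hi - 1 - k := by
    simp only [List.length_reverse, List.length_drop]; omega
  unfold listRightIndexA
  rw [PySem.List.slice?_none_none_neg_one]
  simp only [hidx, hplen, hlen]
  congr 1
  omega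

-- dropping (k - lo) from the [lo,hi) slice gives the [k,hi) slice
theorem pv_slice_drop (items : List Int) (lo hi k : Nat) (hlo : lo ≤ k) :
    ((items.drop lo).take (hi - lo)).drop (k - lo) = (items.drop k).take (hi - k) := by
  rw [List.drop_take, List.drop_drop]
  have h1 : lo + (k - lo) = k := by omega
  have h2 : hi - lo - (k - lo) = hi - k := by omega
  rw [h1, h2]

-- max? of the slice is the rightmost-max value
theorem pv_max_slice (items : List Int) (lo hi : Nat) (v : Int) (k : Nat)
    (hlo : lo < hi) (hhi : hi ≤ items.length) (h : PvIsRMax items lo hi v k) :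
    PySem.List.max? ((items.drop lo).take (hi - lo)) (fun x => x) = some v := by
  obtain ⟨h1, h2, h3, h4, h5⟩ := h
  have hlen : ((items.drop lo).take (hi - lo)).length = hi - lo := by
    simp only [List.length_take, List.length_drop]; omega
  cases hm : PySem.List.max? ((items.drop lo).take (hi - lo)) (fun x => x) with
  | none =>
    have := (PySem.List.max?_eq_none_iff
      (xs := (items.drop lo).take (hi - lo)) (key := fun x => x)).mp hm
    rw [this] at hlen
    simp at hlen; omega
  | some m =>
    have hmem := PySem.List.max?_mem hm
    obtain ⟨p, hp, he⟩ := pv_mem_slice items lo hi hhi m hmem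
    have hmv : m ≤ v := he ▸ h4 (lo + p) (by omega) (by omega)
    have hvmem : v ∈ (items.drop lo).take (hi - lo) := by
      have := pv_slice_getElem items lo hi (k - lo) hhi (by omega)
      rw [show lo + (k - lo) = k by omega, h3] at this
      exact this ▸ List.getElem_mem _
    have hvm := PySem.List.max?_isMax hm v hvmem
    simp only at hvm
    exact congrArg some (le_antisymm hmv hvm)

theorem pv_min_slice (items : List Int) (lo hi : Nat) (v : Int) (k : Nat)
    (hlo : lo < hi) (hhi : hi ≤ items.length) (h : PvIsRMin items lo hi v k) :
    PySem.List.min? ((items.drop lo).take (hi - lo)) (fun x => x) = some v := by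
  obtain ⟨h1, h2, h3, h4, h5⟩ := h
  have hlen : ((items.drop lo).take (hi - lo)).length = hi - lo := by
    simp only [List.length_take, List.length_drop]; omega
  cases hm : PySem.List.min? ((items.drop lo).take (hi - lo)) (fun x => x) with
  | none =>
    have := (PySem.List.min?_eq_none_iff
      (xs := (items.drop lo).take (hi - lo)) (key := fun x => x)).mp hm
    rw [this] at hlen
    simp at hlen; omega
  | some m =>
    have hmem := PySem.List.min?_mem hm
    obtain ⟨p, hp, he⟩ := pv_mem_slice items lo hi hhi m hmem
    have hmv : v ≤ m := he ▸ h4 (lo + p) (by omega) (by omega)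
    have hvmem : v ∈ (items.drop lo).take (hi - lo) := by
      have := pv_slice_getElem items lo hi (k - lo) hhi (by omega)
      rw [show lo + (k - lo) = k by omega, h3] at this
      exact this ▸ List.getElem_mem _
    have hvm := PySem.List.min?_isMin hm v hvmem
    simp only at hvm
    exact congrArg some (le_antisymm hvm hmv)

-- the scan of round (lo, hi) establishes the invariant
-- entry t of rm is the rightmost argmax of items[lo : lo+t+1]
def PvRmSpec (items : List Int) (lo n : Nat) (rm : List Nat) : Prop :=
  rm.length = n ∧ ∀ t, t < n →
    PvIsRMax items lo (lo + t + 1) (items.getD (rm.getD t 0) 0) (rm.getD t 0)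

theorem pv_getD_append_last (l : List Nat) (b : Nat) : (l ++ [b]).getD l.length 0 = b := by
  rw [List.getD_eq_getElem _ _ (by simp)]
  simp

theorem pvRmLoop_inv (items : List Int) (lo : Nat) : ∀ (s j : Nat) (rm : List Nat)
    (best : Nat) (maxv : Int),
    PvIsRMax items lo j maxv best →
    PvRmSpec items lo (j - lo) rm →
    PvRmSpec items lo (j - lo + s) (pvRmLoop items j s rm best maxv).1 := by
  intro s
  induction s with
  | zero => intro j rm best maxv hb hrm; simpa [pvRmLoop] using hrm
  | succ s ih =>
    intro j rm best maxv hb hrm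
    obtain ⟨hb1, hb2, hb3, hb4, hb5⟩ := hb
    obtain ⟨hlen, hent⟩ := hrm
    have hjlo : lo ≤ j := le_trans hb1 (le_of_lt hb2)
    have hnext : ∀ (b' : Nat) (v' : Int), PvIsRMax items lo (j + 1) v' b' →
        items.getD b' 0 = v' →
        PvRmSpec items lo (j - lo + (s + 1)) (pvRmLoop items (j + 1) s (rm ++ [b']) b' v').1 := by
      intro b' v' hB hv'
      have hrm' : PvRmSpec items lo ((j + 1) - lo) (rm ++ [b']) := by
        refine ⟨by simp [hlen]; omega, ?_⟩
        intro t ht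
        rcases Nat.lt_or_ge t (j - lo) with hlt | hge
        · rw [List.getD_append rm [b'] 0 t (by omega)]
          exact hent t hlt
        · have hteq : t = j - lo := by omega
          have : (rm ++ [b']).getD t 0 = b' := by
            rw [hteq, ← hlen]; exact pv_getD_append_last rm b'
          rw [this, hv']
          rw [show lo + t + 1 = j + 1 by omega]
          exact hB
      have := ih (j + 1) (rm ++ [b']) b' v' hB hrm'
      rw [show (j + 1) - lo + s = j - lo + (s + 1) by omega] at this
      exact this
    simp only [pvRmLoop]
    split_ifs with hc
    · -- x ≥ maxv : new rightmost max at j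
      refine hnext j (items.getD j 0) ⟨hjlo, by omega, rfl, ?_, ?_⟩ rfl
      · intro j' hj1 hj2
        rcases Nat.lt_or_ge j' j with hlt | hge
        · exact le_trans (hb4 j' hj1 hlt) hc
        · rw [show j' = j by omega]
      · intro j' hj1 hj2; omega
    · -- x < maxv : old rightmost max extends to the right
      refine hnext best maxv ⟨hb1, by omega, hb3, ?_, ?_⟩ hb3
      · intro j' hj1 hj2
        rcases Nat.lt_or_ge j' j with hlt | hge
        · exact hb4 j' hj1 hlt
        · rw [show j' = j by omega]; omega
      · intro j' hj1 hj2
        rcases Nat.lt_or_ge j' j with hlt | hge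
        · exact hb5 j' hj1 hlt
        · rw [show j' = j by omega]; omega

-- the full build call satisfies the table spec
theorem pvRm_build (items : List Int) (lo hi : Nat) (hlo : lo < hi) :
    PvRmSpec items lo (hi - lo)
      (pvRmLoop items lo (hi - lo) [] lo (items.getD lo 0)).1 := by
  obtain ⟨s, hs⟩ : ∃ s, hi - lo = s + 1 := ⟨hi - lo - 1, by omega⟩
  rw [hs]
  simp only [pvRmLoop, if_pos (le_refl (items.getD lo 0))]
  have h1 : PvIsRMax items lo (lo + 1) (items.getD lo 0) lo := by
    refine ⟨le_refl _, by omega, rfl, ?_, ?_⟩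
    · intro j hj1 hj2; rw [show j = lo by omega]
    · intro j hj1 hj2; omega
  have h2 : PvRmSpec items lo ((lo + 1) - lo) ([] ++ [lo]) := by
    refine ⟨by simp, ?_⟩
    intro t ht
    have : t = 0 := by omega
    subst this
    simpa using h1
  have := pvRmLoop_inv items lo s (lo + 1) ([] ++ [lo]) lo (items.getD lo 0) h1 h2
  rw [show (lo + 1) - lo + s = s + 1 by omega] at this
  simpa using this

theorem pvMinScan_inv (items : List Int) (base hi : Nat) : ∀ (s : Nat) (st : Int × Nat),
    PvIsRMin items (base + s) hi st.1 st.2 →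
    PvIsRMin items base hi (pvMinScan items base s st).1 (pvMinScan items base s st).2 := by
  intro s
  induction s with
  | zero => intro st h; simpa [pvMinScan] using h
  | succ s ih =>
    intro st h
    have h' : PvIsRMin items (base + s + 1) hi st.1 st.2 := by
      rw [show base + s + 1 = base + (s + 1) by omega]; exact h
    simp only [pvMinScan]
    split_ifs with hc
    · exact ih (items.getD (base + s) 0, base + s) (pv_rmin_new items (base + s) hi st.1 st.2 h' hc)
    · exact ih st (pv_rmin_extend items (base + s) hi st.1 st.2 h' (not_lt.mp hc))

-- the main lemma: A's recursion on the slice = B's loop on the window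
theorem pv_main (items : List Int) : ∀ (fa fb lo hi : Nat), lo < hi → hi ≤ items.length →
    hi - lo < fa → items.length - lo < fb →
    targetPriceGoA fa ((items.drop lo).take (hi - lo)) = targetPriceGoB items fb lo hi := by
  intro fa
  induction fa using Nat.strong_induction_on with
  | _ fa ihA =>
    intro fb lo hi h1 h2 h3 h4
    cases fb with
    | zero => omega
    | succ fb =>
      set rm := (pvRmLoop items lo (hi - lo) [] lo (items.getD lo 0)).1 with hrm
      obtain ⟨hrmlen, hrment⟩ := pvRm_build items lo hi h1
      -- inner induction over the peel loop
      have inner : ∀ (f h fa' : Nat), lo < h → h ≤ hi → h ≤ f → h - lo < fa' → fa' ≤ fa →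
          targetPriceGoA fa' ((items.drop lo).take (h - lo)) =
            (let hi' := pvPeel rm lo f h
             let imax := rm.getD (hi' - lo - 1) 0
             let mn := pvMinScan items imax ((hi' - 1) - imax)
               (items.getD (hi' - 1) 0, hi' - 1)
             if (hi' : Int) - (mn.2 : Int) > 3 then targetPriceGoB items fb mn.2 hi'
             else some mn.1) := by
        intro f
        induction f with
        | zero => intro h fa' hh1 hh2 hh3; omega
        | succ f ihf =>
          intro h fa' hh1 hh2 hh3 hh4 hh5
          cases fa' with
          | zero => omega
          | succ fa' =>
            have hmaxI := hrment (h - lo - 1) (by omega)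
            rw [show lo + (h - lo - 1) + 1 = h by omega] at hmaxI
            set imax := rm.getD (h - lo - 1) 0 with himax
            have f1 : lo ≤ imax := hmaxI.1
            have f2 : imax < h := hmaxI.2.1
            set l := (items.drop lo).take (h - lo) with hl
            have hlen : l.length = h - lo := pv_slice_length items lo h (by omega) (by omega)
            have hmaxeq : PySem.List.max? l (fun x => x) = some (items.getD imax 0) :=
              pv_max_slice items lo h (items.getD imax 0) imax hh1 (by omega) hmaxI
            have hridx : listRightIndexA l (items.getD imax 0) =
                some ((imax : Int) - (lo : Int)) :=
              pv_listRightIndexA items lo h imax (items.getD imax 0) f1 f2 (by omega)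
                rfl (fun j hj1 hj2 => ne_of_lt (hmaxI.2.2.2.2 j hj1 hj2))
            simp only [targetPriceGoA, hlen, hmaxeq, hridx]
            rw [if_neg (show ¬ (h - lo = 0) by omega)]
            by_cases hc : ((imax : Int) + 7 ≥ (h : Int)) ∧ ((h : Int) - (lo : Int) > 3)
            · -- one peel step
              rw [if_pos (show ((imax : Int) - (lo : Int)) + 1 ≥ ((h - lo : Nat) : Int) - 6 ∧
                  ((h - lo : Nat) : Int) > 3 by omega)]
              rw [PySem.List.slice_to_neg_ofNat l 2 (by norm_num), hlen]
              have harg : l.take (h - lo - 2) = (items.drop lo).take ((h - 2) - lo) := by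
                rw [hl, List.take_take]
                congr 1
                omega
              rw [harg]
              have hpeel : pvPeel rm lo (f + 1) h = pvPeel rm lo f (h - 2) := by
                rw [pvPeel, if_pos (by exact_mod_cast hc)]
              rw [hpeel]
              exact ihf (h - 2) fa' (by omega) (by omega) (by omega) (by omega) (by omega)
            · -- peel stops: A takes the min path
              rw [if_neg (show ¬ (((imax : Int) - (lo : Int)) + 1 ≥ ((h - lo : Nat) : Int) - 6 ∧
                  ((h - lo : Nat) : Int) > 3) by omega)]
              have hpeel : pvPeel rm lo (f + 1) h = h := by
                rw [pvPeel, if_neg (by exact_mod_cast hc)]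
              rw [hpeel]
              set mn := pvMinScan items imax ((h - 1) - imax)
                (items.getD (h - 1) 0, h - 1) with hmn
              have hminI : PvIsRMin items imax h mn.1 mn.2 := by
                have hinit : PvIsRMin items (imax + ((h - 1) - imax)) h
                    (items.getD (h - 1) 0, h - 1).1 (items.getD (h - 1) 0, h - 1).2 := by
                  rw [show imax + ((h - 1) - imax) = h - 1 by omega]
                  refine ⟨le_refl _, by omega, rfl, ?_, ?_⟩
                  · intro j hj1 hj2; rw [show j = h - 1 by omega]
                  · intro j hj1 hj2; omega
                exact pvMinScan_inv items imax h ((h - 1) - imax) _ hinit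
              have g1 : imax ≤ mn.2 := hminI.1
              have g2 : mn.2 < h := hminI.2.1
              have hnew : PySem.List.slice l (some ((imax : Int) - (lo : Int))) none =
                  (items.drop imax).take (h - imax) := by
                rw [PySem.List.slice_from _ (by omega : (0:Int) ≤ (imax : Int) - (lo : Int))]
                rw [show ((imax : Int) - (lo : Int)).toNat = imax - lo by omega]
                exact pv_slice_drop items lo h imax f1
              have hmineq : PySem.List.min? ((items.drop imax).take (h - imax))
                  (fun x => x) = some mn.1 :=
                pv_min_slice items imax h mn.1 mn.2 f2 (by omega) hminI
              have hridx2 : listRightIndexA ((items.drop imax).take (h - imax)) mn.1 =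
                  some ((mn.2 : Int) - (imax : Int)) :=
                pv_listRightIndexA items imax h mn.2 mn.1 g1 g2 (by omega) hminI.2.2.1
                  (fun j hj1 hj2 => ne_of_gt (hminI.2.2.2.2 j hj1 hj2))
              simp only [hnew, hmineq, hridx2]
              have hnew2 : PySem.List.slice ((items.drop imax).take (h - imax))
                  (some ((mn.2 : Int) - (imax : Int))) none =
                  (items.drop mn.2).take (h - mn.2) := by
                rw [PySem.List.slice_from _ (by omega : (0:Int) ≤ (mn.2 : Int) - (imax : Int))]
                rw [show ((mn.2 : Int) - (imax : Int)).toNat = mn.2 - imax by omega]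
                exact pv_slice_drop items imax h mn.2 g1
              rw [hnew2]
              have hlen2 : ((items.drop mn.2).take (h - mn.2)).length = h - mn.2 :=
                pv_slice_length items mn.2 h (by omega) (by omega)
              by_cases hc2 : (h : Int) - (mn.2 : Int) > 3
              · rw [if_pos (show ((items.drop mn.2).take (h - mn.2)).length > 3 by omega),
                    if_pos hc2]
                -- the window really shrinks: mn.2 > lo
                have hgt : lo < mn.2 := by
                  by_contra hle
                  have h_imax_lo : imax = lo := by omega
                  have h_imin_lo : mn.2 = lo := by omega
                  have hx : items.getD (lo + 1) 0 < items.getD imax 0 :=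
                    hmaxI.2.2.2.2 (lo + 1) (by omega) (by omega)
                  have hy : mn.1 < items.getD (lo + 1) 0 :=
                    hminI.2.2.2.2 (lo + 1) (by omega) (by omega)
                  have e2 : items.getD lo 0 = mn.1 := h_imin_lo ▸ hminI.2.2.1
                  rw [h_imax_lo] at hx
                  linarith [e2 ▸ hx, hy]
                exact ihA fa' (by omega) fb mn.2 h (by omega) (by omega) (by omega) (by omega)
              · rw [if_neg (show ¬ (((items.drop mn.2).take (h - mn.2)).length > 3) by omega),
                    if_neg hc2]
      have := inner hi hi fa h1 (le_refl hi) (le_refl hi) h3 (le_refl fa)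
      simpa only [targetPriceGoB] using this

-- ===== VERDICT (by name: the statement is the Claim_ definition above) =====
theorem targetPrice_spec : Claim_equal_targetPrice := by
  intro items _
  unfold Spec_targetPrice targetPrice targetPrice_alt
  by_cases h : items.length = 0
  · rw [if_pos h]
    simp [targetPriceGoA, h]
  · rw [if_neg h]
    have := pv_main items (items.length + 1) (items.length + 1) 0 items.length
      (by omega) (le_refl _) (by omega) (by omega)
    simpa using this
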